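-- pv_equiv track=rewrite | github.com/ChristianLaraa/DisenoAnalisisAlgoritmos | Ejerc5.1.py | se_puede_formar
-- ===== SOURCE A (Python) =====
-- def se_puede_formar(n):
--     # Crear una lista para almacenar si es posible formar un número i
--     posible = [False] * (n + 1)
--
--     # Base case: el número 0 siempre se puede formar (no seleccionar ningún paquete)
--     posible[0] = True
--
--     # Recorrer todos los números desde 1 hasta n
--     for i in range(1, n + 1):
--         # Verificar si se puede formar el número actual usando un paquete de 5, 8 o 24
--         if i >= 5 and posible[i - 5]:
--             posible[i] = True
--         if i >= 8 and posible[i - 8]: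
--             posible[i] = True
--         if i >= 24 and posible[i - 24]:
--             posible[i] = True
--
--     return posible[n]
-- ===== SOURCE B (Python) =====
-- _FORMABLE_SMALL = {0, 5, 8, 10, 13, 15, 16, 18, 20, 21, 23, 24, 25, 26}
--
-- def se_puede_formar(n):
--     # Chicken McNugget / Frobenius: with packages 5 and 8 every n >= 28 is formable
--     # (Frobenius number of {5,8} is 27); below 28 the formable values are a fixed finite set.
--     return n >= 28 or n in _FORMABLE_SMALL
-- ===== Notes on version B (the rewrite author's own statement) =====
-- stated objective: faster
-- what changed: Replaced the O(n) dynamic-programming table over 0..n by the closed form from the Frobenius number of {5,8} (=27): n is formable iff n >= 28 or n is in a hardcoded 14-element set.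
import Mathlib
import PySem

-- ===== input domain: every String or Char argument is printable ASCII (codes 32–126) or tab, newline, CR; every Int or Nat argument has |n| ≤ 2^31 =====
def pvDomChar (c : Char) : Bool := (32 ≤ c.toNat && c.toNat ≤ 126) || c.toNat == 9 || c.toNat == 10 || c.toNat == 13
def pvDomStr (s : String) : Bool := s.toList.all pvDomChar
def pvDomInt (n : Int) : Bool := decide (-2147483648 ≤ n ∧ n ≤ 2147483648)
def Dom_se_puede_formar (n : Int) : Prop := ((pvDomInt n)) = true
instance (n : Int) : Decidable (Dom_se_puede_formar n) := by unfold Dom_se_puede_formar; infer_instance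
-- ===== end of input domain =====

-- B replaces A's O(n) DP table by the O(1) Frobenius closed form (n formable iff n ≥ 28 or in a fixed finite set); Pre_ excludes n < 0, where A raises IndexError.


-- ===== PORT A =====
-- loop body of A's for-loop (the three guarded table updates), kept as a helper
def stepA (l : List Bool) (i : Int) : List Bool :=
  let l := if 5 ≤ i ∧ PySem.List.pyGetD l (i - 5) false = true then PySem.List.pySetD l i true else l
  let l := if 8 ≤ i ∧ PySem.List.pyGetD l (i - 8) false = true then PySem.List.pySetD l i true else l
  let l := if 24 ≤ i ∧ PySem.List.pyGetD l (i - 24) false = true then PySem.List.pySetD l i true else l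
  l

def se_puede_formar (n : Int) : Bool :=
  -- posible = [False] * (n + 1); posible[0] = True  (the assignment raises for n < 0: Pre_)
  let posible := PySem.List.pySetD (List.replicate (n + 1).toNat false) 0 true
  let posible := (PySem.List.pyRange 1 (n + 1) 1).foldl stepA posible
  PySem.List.pyGetD posible n false

-- ===== PORT B =====
def se_puede_formar_alt (n : Int) : Bool :=
  decide (28 ≤ n) || ([0, 5, 8, 10, 13, 15, 16, 18, 20, 21, 23, 24, 25, 26] : List Int).contains n

-- ===== PRECONDITION & SPEC =====
-- Pre_ excludes exactly n < 0, where A raises IndexError (posible[0] = True on an empty list).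
def Pre_se_puede_formar (n : Int) : Prop := 0 ≤ n
instance (n : Int) : Decidable (Pre_se_puede_formar n) := by unfold Pre_se_puede_formar; infer_instance
def pvWitness_se_puede_formar : Int := (5)

def Spec_se_puede_formar (n : Int) (out : Bool) : Prop := out = se_puede_formar_alt n
instance (n : Int) (out : Bool) : Decidable (Spec_se_puede_formar n out) := by unfold Spec_se_puede_formar; infer_instance

-- ===== CLAIM (what is proved, stated in full; the proofs are below) =====
def Claim_equal_se_puede_formar : Prop := ∀ (n : Int), Dom_se_puede_formar n → Pre_se_puede_formar n → Spec_se_puede_formar n (se_puede_formar n)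

-- ===== LEMMAS AND PROOFS =====

-- Nat-side closed form of B
def good (j : Nat) : Bool :=
  decide (28 ≤ j) || ([0, 5, 8, 10, 13, 15, 16, 18, 20, 21, 23, 24, 25, 26] : List Nat).contains j

-- the DP table after processing 1..k (entries above k still at their initial value false)
def Lst (m k : Nat) : List Bool := (List.range (m + 1)).map (fun j => if j ≤ k then good j else false)

lemma alt_eq_good (m : Nat) : se_puede_formar_alt (m : Int) = good m := by
  by_cases h : 28 ≤ m
  · simp [se_puede_formar_alt, good, decide_eq_true h]
  · have h' : m ≤ 27 := by omega
    interval_cases m <;> decide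

lemma getD_Lst (m k j : Nat) (hj : j < m + 1) :
    (Lst m k).getD j false = if j ≤ k then good j else false := by
  rw [List.getD_eq_getElem?_getD]
  simp [Lst, hj]


lemma good_rec (i : Nat) (hi : 1 ≤ i) :
    good i = ((decide (5 ≤ i) && good (i - 5)) || (decide (8 ≤ i) && good (i - 8))
      || (decide (24 ≤ i) && good (i - 24))) := by
  by_cases h : i ≤ 32
  · interval_cases i <;> decide
  · have h28 : good i = true := by
      simp [good, decide_eq_true (show 28 ≤ i by omega)]
    have h5 : good (i - 5) = true := by
      simp [good, decide_eq_true (show 28 ≤ i - 5 by omega)]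
    simp [h28, h5, decide_eq_true (show 5 ≤ i by omega)]

lemma Lst_succ_true (m k : Nat) (hg : good (k + 1) = true) :
    (Lst m k).set (k + 1) true = Lst m (k + 1) := by
  apply List.ext_getElem
  · simp [Lst]
  · intro j h1 h2
    by_cases hj : j = k + 1
    · subst hj
      rw [List.getElem_set_self (by simpa [Lst] using h2)]
      simp [Lst, hg]
    · rw [List.getElem_set_ne (by simpa [Lst, eq_comm] using hj)]
      simp only [Lst, List.getElem_map, List.getElem_range]
      simp [show (j ≤ k) ↔ (j ≤ k + 1) from by omega]

lemma Lst_succ_false (m k : Nat) (hg : good (k + 1) = false) :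
    Lst m k = Lst m (k + 1) := by
  simp only [Lst]
  apply List.map_congr_left
  intro j hj
  by_cases h : j = k + 1
  · subst h; simp [hg]
  · by_cases h2 : j ≤ k
    · rw [if_pos h2, if_pos (by omega)]
    · rw [if_neg h2, if_neg (by omega)]


lemma stepA_Lst (m k : Nat) (hk : k + 1 ≤ m) :
    stepA (Lst m k) ((k + 1 : Nat) : Int) = Lst m (k + 1) := by
  have hlen : (Lst m k).length = m + 1 := by simp [Lst]
  have read : ∀ (l : List Bool) (c : Nat),
      (l = Lst m k ∨ l = (Lst m k).set (k + 1) true) → 1 ≤ c → c ≤ k + 1 →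
      PySem.List.pyGetD l (((k + 1 : Nat) : Int) - (c : Int)) false = good (k + 1 - c) := by
    intro l c hl hc1 hc2
    have hcast : ((k + 1 : Nat) : Int) - (c : Int) = ((k + 1 - c : Nat) : Int) := by
      push_cast; omega
    rcases hl with rfl | rfl
    · rw [hcast, PySem.List.pyGetD_natCast, List.getD_eq_getElem?_getD]
      simp [Lst, show k + 1 - c < m + 1 by omega, show k + 1 - c ≤ k by omega]
    · rw [hcast, ← PySem.List.pySetD_natCast (Lst m k) (k + 1) true,
        PySem.List.pyGetD_pySetD_natCast _ _ _ _ _ (by omega),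
        if_neg (by omega), PySem.List.pyGetD_natCast, List.getD_eq_getElem?_getD]
      simp [Lst, show k + 1 - c < m + 1 by omega, show k + 1 - c ≤ k by omega]
  have cond : ∀ (l : List Bool), (l = Lst m k ∨ l = (Lst m k).set (k + 1) true) →
      ∀ (c : Nat) (ci : Int), ci = (c : Int) → 1 ≤ c →
      ((ci ≤ ((k + 1 : Nat) : Int) ∧ PySem.List.pyGetD l (((k + 1 : Nat) : Int) - ci) false = true)
        ↔ (c ≤ k + 1 ∧ good (k + 1 - c) = true)) := by
    intro l hl c ci hci hc1
    subst hci
    constructor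
    · rintro ⟨h1, h2⟩
      have hc : c ≤ k + 1 := by exact_mod_cast h1
      exact ⟨hc, by rw [← read l c hl hc1 hc]; exact h2⟩
    · rintro ⟨h1, h2⟩
      exact ⟨by exact_mod_cast h1, by rw [read l c hl hc1 h1]; exact h2⟩
  have hset : PySem.List.pySetD (Lst m k) ((k + 1 : Nat) : Int) true
      = (Lst m k).set (k + 1) true := PySem.List.pySetD_natCast _ _ _
  have hset2 : PySem.List.pySetD ((Lst m k).set (k + 1) true) ((k + 1 : Nat) : Int) true
      = (Lst m k).set (k + 1) true := by
    rw [PySem.List.pySetD_natCast, List.set_set]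
  have hrec := good_rec (k + 1) (by omega)
  simp only [stepA]
  simp only [cond (Lst m k) (Or.inl rfl) 5 5 (by norm_num) (by norm_num)]
  by_cases d5 : 5 ≤ k + 1 ∧ good (k + 1 - 5) = true
  · simp only [if_pos d5, hset]
    have hg : good (k + 1) = true := by
      rw [hrec]
      simp only [Bool.or_eq_true, Bool.and_eq_true, decide_eq_true_eq]
      exact Or.inl (Or.inl ⟨d5.1, d5.2⟩)
    simp only [cond ((Lst m k).set (k + 1) true) (Or.inr rfl) 8 8 (by norm_num) (by norm_num)]
    by_cases d8 : 8 ≤ k + 1 ∧ good (k + 1 - 8) = true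
    · simp only [if_pos d8, hset2]
      simp only [cond ((Lst m k).set (k + 1) true) (Or.inr rfl) 24 24 (by norm_num) (by norm_num)]
      by_cases d24 : 24 ≤ k + 1 ∧ good (k + 1 - 24) = true
      · simp only [if_pos d24]
        exact Lst_succ_true m k hg
      · simp only [if_neg d24]
        exact Lst_succ_true m k hg
    · simp only [if_neg d8]
      simp only [cond ((Lst m k).set (k + 1) true) (Or.inr rfl) 24 24 (by norm_num) (by norm_num)]
      by_cases d24 : 24 ≤ k + 1 ∧ good (k + 1 - 24) = true
      · simp only [if_pos d24, hset2]
        exact Lst_succ_true m k hg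
      · simp only [if_neg d24]
        exact Lst_succ_true m k hg
  · simp only [if_neg d5]
    simp only [cond (Lst m k) (Or.inl rfl) 8 8 (by norm_num) (by norm_num)]
    by_cases d8 : 8 ≤ k + 1 ∧ good (k + 1 - 8) = true
    · simp only [if_pos d8, hset]
      have hg : good (k + 1) = true := by
        rw [hrec]
        simp only [Bool.or_eq_true, Bool.and_eq_true, decide_eq_true_eq]
        exact Or.inl (Or.inr ⟨d8.1, d8.2⟩)
      simp only [cond ((Lst m k).set (k + 1) true) (Or.inr rfl) 24 24 (by norm_num) (by norm_num)]
      by_cases d24 : 24 ≤ k + 1 ∧ good (k + 1 - 24) = true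
      · simp only [if_pos d24, hset2]
        exact Lst_succ_true m k hg
      · simp only [if_neg d24]
        exact Lst_succ_true m k hg
    · simp only [if_neg d8]
      simp only [cond (Lst m k) (Or.inl rfl) 24 24 (by norm_num) (by norm_num)]
      by_cases d24 : 24 ≤ k + 1 ∧ good (k + 1 - 24) = true
      · simp only [if_pos d24, hset]
        have hg : good (k + 1) = true := by
          rw [hrec]
          simp only [Bool.or_eq_true, Bool.and_eq_true, decide_eq_true_eq]
          exact Or.inr ⟨d24.1, d24.2⟩
        exact Lst_succ_true m k hg
      · simp only [if_neg d24]
        apply Lst_succ_false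
        rw [hrec]
        have mk : ∀ (P : Prop) [Decidable P] (b : Bool), ¬ (P ∧ b = true) → (decide P && b) = false := by
          intro P _ b h
          by_cases hP : P
          · have : b ≠ true := fun hb => h ⟨hP, hb⟩
            simp [this]
          · simp [hP]
        rw [mk _ _ d5, mk _ _ d8, mk _ _ d24]
        rfl

lemma fold_Lst (m : Nat) : ∀ k, k ≤ m →
    (PySem.List.pyRange 1 ((k : Int) + 1) 1).foldl stepA (Lst m 0) = Lst m k := by
  intro k
  induction k with
  | zero => intro _; simp [PySem.List.pyRange_one_eq_nil]
  | succ k ih =>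
    intro hk
    have h1 : (1 : Int) ≤ (k : Int) + 1 := by omega
    rw [show ((k + 1 : Nat) : Int) + 1 = ((k : Int) + 1) + 1 by push_cast; ring,
      PySem.List.pyRange_one_succ_right h1, List.foldl_append, ih (by omega)]
    simpa using stepA_Lst m k hk

lemma init_Lst (m : Nat) :
    PySem.List.pySetD (List.replicate (m + 1) false) 0 true = Lst m 0 := by
  rw [PySem.List.pySetD_of_nonneg _ _ (by norm_num)]
  apply List.ext_getElem
  · simp [Lst]
  · intro j h1 h2
    simp only [Lst, List.getElem_map, List.getElem_range]
    rcases Nat.eq_zero_or_pos j with h | h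
    · subst h
      simp [good]
    · rw [List.getElem_set_ne (by simp; omega)]
      simp [Nat.pos_iff_ne_zero.mp h]

-- ===== VERDICT (by name: the statement is the Claim_ definition above) =====
theorem se_puede_formar_spec : Claim_equal_se_puede_formar := by
  intro n _ hn
  obtain ⟨m, rfl⟩ := Int.eq_ofNat_of_zero_le hn
  show se_puede_formar (m : Int) = se_puede_formar_alt (m : Int)
  rw [alt_eq_good]
  simp only [se_puede_formar]
  rw [show ((m : Int) + 1).toNat = m + 1 by omega, init_Lst m, fold_Lst m m le_rfl]
  rw [PySem.List.pyGetD_natCast, getD_Lst m m m (by omega)]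
  simp
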